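-- pv_equiv track=rewrite | github.com/OneYaYa/MAM | model/image_model.py | remove_overlap
-- ===== SOURCE A (Python) =====
-- def remove_overlap(existing_text, new_text):
--     '''
--     移除新文本中与现有文本重叠的部分
--     '''
--     if not existing_text or not new_text:
--         return new_text
--
--     # 查找最长的重叠后缀
--     max_overlap = min(len(existing_text), len(new_text))
--     for i in range(max_overlap, 0, -1):
--         if existing_text[-i:] == new_text[:i]:
--             return new_text[i:]
--
--     return new_text
-- ===== SOURCE B (Python) =====
-- def remove_overlap(existing_text, new_text):
--     '''
--     移除新文本中与现有文本重叠的部分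
--     '''
--     if not existing_text or not new_text:
--         return new_text
--
--     # KMP failure function of new_text: fail[j] = length of the longest proper
--     # border (prefix that is also a suffix) of new_text[:j+1]
--     p = new_text
--     m = len(p)
--     fail = [0]
--     k = 0
--     for j in range(1, m):
--         c = p[j]
--         while k > 0 and p[k] != c:
--             k = fail[k - 1]
--         if p[k] == c:
--             k += 1
--         fail.append(k)
--
--     # stream existing_text through the matcher; the final state is the length
--     # of the longest prefix of new_text that is a suffix of existing_text
--     k = 0
--     for c in existing_text:
--         if k == m:
--             k = fail[m - 1]
--         while k > 0 and p[k] != c: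
--             k = fail[k - 1]
--         if p[k] == c:
--             k += 1
--     return new_text[k:]
-- ===== Notes on version B (the rewrite author's own statement) =====
-- stated objective: faster
-- what changed: Replaces the descending brute-force scan that slices and compares every candidate suffix/prefix pair with a KMP matcher: a failure function of new_text is built once and existing_text is streamed through it, the final automaton state being the overlap length.
import Mathlib
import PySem

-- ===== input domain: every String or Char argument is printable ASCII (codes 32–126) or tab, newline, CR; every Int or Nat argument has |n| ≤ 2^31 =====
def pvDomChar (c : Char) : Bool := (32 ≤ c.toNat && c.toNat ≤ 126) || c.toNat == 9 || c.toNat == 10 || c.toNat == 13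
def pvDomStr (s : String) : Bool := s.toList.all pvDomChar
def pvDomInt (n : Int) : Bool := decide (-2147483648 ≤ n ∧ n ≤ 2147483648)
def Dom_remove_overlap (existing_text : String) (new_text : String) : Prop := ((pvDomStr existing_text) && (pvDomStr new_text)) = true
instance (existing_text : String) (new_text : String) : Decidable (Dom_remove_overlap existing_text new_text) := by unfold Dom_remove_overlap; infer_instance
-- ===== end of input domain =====

-- B replaces A's descending brute-force slice-and-compare scan by a KMP matcher
-- (failure function of new_text, existing_text streamed through it): objective 'faster'.

-- ===== PORT A =====
-- the 'for i in range(max_overlap, 0, -1)' loop with its early return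
def removeOverlapLoopA (existing_text : String) (new_text : String) : List Int → String
  | [] => new_text
  | i :: rest =>
    if PySem.Str.slice existing_text (some (-i)) none = PySem.Str.slice new_text none (some i)
    then PySem.Str.slice new_text (some i) none
    else removeOverlapLoopA existing_text new_text rest

def remove_overlap (existing_text : String) (new_text : String) : String :=
  if existing_text = "" ∨ new_text = "" then new_text
  else
    removeOverlapLoopA existing_text new_text
      (PySem.List.pyRange (min (PySem.Str.len existing_text) (PySem.Str.len new_text)) 0 (-1))

-- ===== PORT B =====
-- the inner 'while k > 0 and p[k] != c: k = fail[k-1]' (the 'min _ (k-1)' is only a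
-- totality guard: the proofs show fail[k-1] ≤ k-1 whenever the loop runs)
def kmpWhile (p : List Char) (F : List Nat) (c : Char) (k : Nat) : Nat :=
  if h : 0 < k ∧ p[k]? ≠ some c then kmpWhile p F c (min (F.getD (k-1) 0) (k-1)) else k
termination_by k
decreasing_by have := h.1; omega

-- the while loop followed by 'if p[k] == c: k += 1'
def kmpStep (p : List Char) (F : List Nat) (c : Char) (k : Nat) : Nat :=
  let k' := kmpWhile p F c k
  if p[k']? = some c then k' + 1 else k'

-- one iteration of the failure-function building loop: c = p[j]; fail.append(k)
def kmpFailStep (p : List Char) (st : List Nat × Nat) (j : Int) : List Nat × Nat :=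
  let c := PySem.List.pyGetD p j ' '
  let k := kmpStep p st.1 c st.2
  (st.1 ++ [k], k)

-- 'fail = [0]; k = 0; for j in range(1, m): …'
def kmpFail (p : List Char) : List Nat :=
  ((PySem.List.pyRange 1 (p.length : Int) 1).foldl (kmpFailStep p) ([0], 0)).1

def remove_overlap_alt (existing_text : String) (new_text : String) : String :=
  if existing_text = "" ∨ new_text = "" then new_text
  else
    let p := new_text.toList
    let m := p.length
    let fail := kmpFail p
    let k := existing_text.toList.foldl (fun k c =>
      let k0 := if k = m then fail.getD (m - 1) 0 else k
      kmpStep p fail c k0) 0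
    PySem.Str.slice new_text (some (k : Int)) none

-- ===== PRECONDITION & SPEC =====
def Spec_remove_overlap (existing_text : String) (new_text : String) (out : String) : Prop := out = remove_overlap_alt existing_text new_text
instance (existing_text : String) (new_text : String) (out : String) : Decidable (Spec_remove_overlap existing_text new_text out) := by unfold Spec_remove_overlap; infer_instance

-- ===== CLAIM (what is proved, stated in full; the proofs are below) =====
def Claim_equal_remove_overlap : Prop := ∀ (existing_text : String) (new_text : String), Dom_remove_overlap existing_text new_text → Spec_remove_overlap existing_text new_text (remove_overlap existing_text new_text)

-- ===== LEMMAS AND PROOFS =====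

-- longest j ≤ |p| such that p.take j is a suffix of t (the overlap both programs compute)
def ovm (p t : List Char) : Nat := Nat.findGreatest (fun j => p.take j <:+ t) p.length

-- longest proper border of p.take j
def bord (p : List Char) (j : Nat) : Nat :=
  Nat.findGreatest (fun b => p.take b <:+ p.take j) (j - 1)

theorem suffix_of_suffix_le {u v t : List Char} (hu : u <:+ t) (hv : v <:+ t)
    (h : u.length ≤ v.length) : u <:+ v := by
  rw [← List.reverse_prefix] at hu hv ⊢
  exact List.prefix_of_prefix_length_le hu hv (by simpa using h)

theorem snoc_suffix_snoc {u t : List Char} {a c : Char} :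
    u ++ [a] <:+ t ++ [c] ↔ a = c ∧ u <:+ t := by
  rw [← List.reverse_prefix, List.reverse_append, List.reverse_append]
  simp only [List.reverse_singleton, List.singleton_append, List.cons_prefix_cons,
    ← List.reverse_prefix]

theorem take_suffix_snoc_iff (p t : List Char) (c : Char) (j : Nat) (h1 : 0 < j)
    (h2 : j ≤ p.length) :
    (p.take j <:+ t ++ [c]) ↔ (p.take (j - 1) <:+ t ∧ p[j - 1]? = some c) := by
  obtain ⟨j, rfl⟩ : ∃ j', j = j' + 1 := ⟨j - 1, by omega⟩
  have hjlt : j < p.length := by omega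
  rw [List.take_add_one, List.getElem?_eq_getElem hjlt]
  simp only [Option.toList_some, snoc_suffix_snoc, Nat.add_sub_cancel,
    List.getElem?_eq_getElem hjlt, Option.some_inj]
  tauto

theorem suffix_iff_eq_drop' {u t : List Char} :
    u <:+ t ↔ t.drop (t.length - u.length) = u := by
  constructor
  · rintro ⟨a, rfl⟩
    simp
  · intro h
    rw [← h]
    exact List.drop_suffix _ _

theorem bord_le (p : List Char) (j : Nat) : bord p j ≤ j - 1 := Nat.findGreatest_le _

theorem take_bord_suffix (p : List Char) (j : Nat) : p.take (bord p j) <:+ p.take j := by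
  unfold bord
  exact Nat.findGreatest_spec (P := fun b => p.take b <:+ p.take j) (Nat.zero_le _) (by simp)

theorem le_bord (p : List Char) (j b : Nat) (hb : b ≤ j - 1) (h : p.take b <:+ p.take j) :
    b ≤ bord p j := Nat.le_findGreatest hb h

theorem ovm_le (p t : List Char) : ovm p t ≤ p.length := Nat.findGreatest_le _

theorem take_ovm_suffix (p t : List Char) : p.take (ovm p t) <:+ t := by
  unfold ovm
  exact Nat.findGreatest_spec (P := fun j => p.take j <:+ t) (Nat.zero_le _) (by simp)

theorem le_ovm (p t : List Char) (b : Nat) (hb : b ≤ p.length) (h : p.take b <:+ t) :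
    b ≤ ovm p t := Nat.le_findGreatest hb h

theorem ovm_nil (p : List Char) : ovm p [] = 0 := by
  apply Nat.findGreatest_eq_zero_iff.2
  intro n h0 hn h
  have h' := List.suffix_nil.1 h
  have hl : (p.take n).length = 0 := by rw [h']; rfl
  rw [List.length_take] at hl
  omega

-- the while loop followed by the increment: from a state k dominating all candidate
-- extension positions, kmpStep computes the longest extensible candidate plus one
theorem kmpStep_spec (p : List Char) (F : List Nat) (c : Char) (M : Nat)
    (_hM : M < p.length)
    (HF : ∀ k', 0 < k' → k' ≤ M → F.getD (k' - 1) 0 = bord p k') (t : List Char) :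
    ∀ k, p.take k <:+ t → k ≤ M →
      (∀ b, b ≤ M → p.take b <:+ t → p[b]? = some c → b ≤ k) →
      (kmpStep p F c k = 0 ∧ ∀ b, b ≤ M → p.take b <:+ t → p[b]? ≠ some c) ∨
      (∃ b, kmpStep p F c k = b + 1 ∧ b ≤ M ∧ p.take b <:+ t ∧ p[b]? = some c ∧
        ∀ b', b' ≤ M → p.take b' <:+ t → p[b']? = some c → b' ≤ b) := by
  intro k
  induction k using Nat.strong_induction_on with
  | _ k IH =>
    intro hk1 hk2 dom
    by_cases hcond : 0 < k ∧ p[k]? ≠ some c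
    · -- the while loop runs once: k becomes fail[k-1] = bord p k
      have hF : F.getD (k - 1) 0 = bord p k := HF k hcond.1 hk2
      have hlt : bord p k ≤ k - 1 := bord_le p k
      have hstep : kmpStep p F c k = kmpStep p F c (bord p k) := by
        unfold kmpStep
        rw [kmpWhile, dif_pos hcond, hF, min_eq_left hlt]
      rw [hstep]
      apply IH (bord p k) (by omega)
      · exact (take_bord_suffix p k).trans hk1
      · omega
      · intro b hbM hbt hbc
        have hbk : b ≤ k := dom b hbM hbt hbc
        have hbne : b ≠ k := by
          intro h; rw [h] at hbc; exact hcond.2 hbc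
        apply le_bord p k b (by omega)
        exact suffix_of_suffix_le hbt hk1 (by simp; omega)
    · have hwhile : kmpWhile p F c k = k := by rw [kmpWhile, dif_neg hcond]
      by_cases hc : p[k]? = some c
      · right
        refine ⟨k, ?_, hk2, hk1, hc, dom⟩
        unfold kmpStep
        rw [hwhile, if_pos hc]
      · have hk0 : k = 0 := by
          by_contra h
          exact hcond ⟨by omega, hc⟩
        left
        constructor
        · unfold kmpStep
          rw [hwhile, if_neg hc]
          exact hk0
        · intro b hbM hbt hbc
          have := dom b hbM hbt hbc
          rw [hk0] at this
          interval_cases b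
          rw [← hk0] at hbc
          exact hc hbc

-- converting kmpStep's contract into 'the next border' (failure-function step)
theorem step_bord (p : List Char) (F : List Nat) (c : Char) (j : Nat) (h1 : 1 ≤ j)
    (hj : j < p.length) (hc : p[j]? = some c)
    (HF : ∀ k', 0 < k' → k' ≤ j - 1 → F.getD (k' - 1) 0 = bord p k') :
    kmpStep p F c (bord p j) = bord p (j + 1) := by
  have spec := kmpStep_spec p F c (j - 1) (by omega) HF (p.take j) (bord p j)
      (take_bord_suffix p j) (bord_le p j)
      (fun b hbM hbt _ => le_bord p j b hbM hbt)
  have hcv : p[j]'hj = c := by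
    rw [List.getElem?_eq_getElem hj] at hc
    exact Option.some.inj hc
  have htake : p.take (j + 1) = p.take j ++ [c] := by
    rw [List.take_add_one, List.getElem?_eq_getElem hj, hcv]
    rfl
  have hsnoc : ∀ n, 0 < n → n ≤ p.length →
      (p.take n <:+ p.take (j + 1) ↔ (p.take (n - 1) <:+ p.take j ∧ p[n - 1]? = some c)) := by
    intro n hn0 hnm
    rw [htake]
    exact take_suffix_snoc_iff p (p.take j) c n hn0 hnm
  rw [show bord p (j + 1) = Nat.findGreatest (fun b => p.take b <:+ p.take (j + 1)) j from by
    unfold bord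
    simp only [Nat.add_sub_cancel]]
  rw [eq_comm, Nat.findGreatest_eq_iff]
  rcases spec with ⟨hr0, hnone⟩ | ⟨b, hrb, hbM, hbt, hbc, hmax⟩
  · rw [hr0]
    refine ⟨Nat.zero_le _, fun h => absurd rfl h, ?_⟩
    intro n hn0 hnj hP
    have h' := (hsnoc n hn0 (by omega)).1 hP
    exact hnone (n - 1) (by omega) h'.1 h'.2
  · rw [hrb]
    refine ⟨by omega, fun _ => ?_, ?_⟩
    · exact (hsnoc (b + 1) (by omega) (by omega)).2 (by simpa using ⟨hbt, hbc⟩)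
    · intro n hrn hnj hP
      have h' := (hsnoc n (by omega) (by omega)).1 hP
      have := hmax (n - 1) (by omega) h'.1 h'.2
      omega

-- converting kmpStep's contract into 'the next overlap' (text-scanning step)
theorem step_ovm (p : List Char) (F : List Nat) (c : Char) (t : List Char)
    (hp : 1 ≤ p.length)
    (HF : ∀ k', 0 < k' → k' ≤ p.length - 1 → F.getD (k' - 1) 0 = bord p k')
    (k0 : Nat) (hk01 : p.take k0 <:+ t) (hk02 : k0 ≤ p.length - 1)
    (dom : ∀ b, b ≤ p.length - 1 → p.take b <:+ t → b ≤ k0) :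
    kmpStep p F c k0 = ovm p (t ++ [c]) := by
  have spec := kmpStep_spec p F c (p.length - 1) (by omega) HF t k0 hk01 hk02
      (fun b hbM hbt _ => dom b hbM hbt)
  unfold ovm
  rw [eq_comm, Nat.findGreatest_eq_iff]
  rcases spec with ⟨hr0, hnone⟩ | ⟨b, hrb, hbM, hbt, hbc, hmax⟩
  · rw [hr0]
    refine ⟨Nat.zero_le _, fun h => absurd rfl h, ?_⟩
    intro n hn0 hnj hP
    have h' := (take_suffix_snoc_iff p t c n hn0 hnj).1 hP
    exact hnone (n - 1) (by omega) h'.1 h'.2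
  · rw [hrb]
    refine ⟨by omega, fun _ => ?_, ?_⟩
    · exact (take_suffix_snoc_iff p t c (b + 1) (by omega) (by omega)).2
        (by simpa using ⟨hbt, hbc⟩)
    · intro n hrn hnj hP
      have h' := (take_suffix_snoc_iff p t c n (by omega) hnj).1 hP
      have := hmax (n - 1) (by omega) h'.1 h'.2
      omega

-- the failure-building loop invariant: after processing j-1 steps the list holds
-- the borders bord p 1 … bord p j and the running k is bord p j
theorem kmpFail_inv (p : List Char) (j : Nat) (h1 : 1 ≤ j) (hj : j ≤ p.length) :
    ((PySem.List.pyRange 1 (j : Int) 1).foldl (kmpFailStep p) ([0], 0)).1.length = j ∧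
    (∀ i, i < j →
      ((PySem.List.pyRange 1 (j : Int) 1).foldl (kmpFailStep p) ([0], 0)).1.getD i 0 = bord p (i + 1)) ∧
    ((PySem.List.pyRange 1 (j : Int) 1).foldl (kmpFailStep p) ([0], 0)).2 = bord p j := by
  induction j, h1 using Nat.le_induction with
  | base =>
    rw [PySem.List.pyRange_one_eq_nil (by norm_num)]
    refine ⟨rfl, ?_, by simp [bord]⟩
    intro i hi
    interval_cases i
    simp [bord]
  | succ j hj1 IH =>
    have hjm : j < p.length := by omega
    obtain ⟨hlen, hent, hk⟩ := IH (by omega)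
    have hrange : PySem.List.pyRange 1 ((j + 1 : Nat) : Int) 1 =
        PySem.List.pyRange 1 (j : Int) 1 ++ [(j : Int)] := by
      push_cast
      exact PySem.List.pyRange_one_succ_right (by exact_mod_cast hj1)
    rw [hrange, List.foldl_append]
    simp only [List.foldl_cons, List.foldl_nil]
    set st := (PySem.List.pyRange 1 (j : Int) 1).foldl (kmpFailStep p) ([0], 0) with hst
    have hcval : PySem.List.pyGetD p (j : Int) ' ' = p[j]'hjm := by
      rw [PySem.List.pyGetD_natCast]
      simp [List.getD, List.getElem?_eq_getElem hjm]
    have hc : p[j]? = some (PySem.List.pyGetD p (j : Int) ' ') := by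
      rw [hcval, List.getElem?_eq_getElem hjm]
    have HF : ∀ k', 0 < k' → k' ≤ j - 1 → st.1.getD (k' - 1) 0 = bord p k' := by
      intro k' h0 hk'
      have := hent (k' - 1) (by omega)
      rw [this]
      congr 1
      omega
    have hstepval : kmpStep p st.1 (PySem.List.pyGetD p (j : Int) ' ') st.2 = bord p (j + 1) := by
      rw [hk]
      exact step_bord p st.1 _ j hj1 hjm hc HF
    refine ⟨?_, ?_, ?_⟩
    · simp only [kmpFailStep, List.length_append, hlen, List.length_cons, List.length_nil]
    · intro i hi
      simp only [kmpFailStep]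
      by_cases hij : i < j
      · rw [List.getD_append _ _ _ _ (by omega)]
        exact hent i hij
      · have hij' : i = j := by omega
        subst hij'
        rw [List.getD_eq_getElem?_getD, List.getElem?_append_right (by omega), hlen]
        simp only [Nat.sub_self, List.getElem?_cons_zero, Option.getD_some]
        exact hstepval
    · simpa only [kmpFailStep] using hstepval

theorem kmpFail_spec (p : List Char) (hp : 1 ≤ p.length) :
    ∀ k', 0 < k' → k' ≤ p.length → (kmpFail p).getD (k' - 1) 0 = bord p k' := by
  intro k' h0 hk
  have := (kmpFail_inv p p.length hp le_rfl).2.1 (k' - 1) (by omega)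
  unfold kmpFail
  rw [this]
  congr 1
  omega

-- the text-scanning loop invariant: the automaton state is the overlap ovm p t
theorem scan_inv (p : List Char) (hp : p ≠ []) (t : List Char) :
    t.foldl (fun k c =>
      let k0 := if k = p.length then (kmpFail p).getD (p.length - 1) 0 else k
      kmpStep p (kmpFail p) c k0) 0 = ovm p t := by
  have hp1 : 1 ≤ p.length := List.length_pos_iff.2 hp
  have HF := kmpFail_spec p hp1
  have HF' : ∀ k', 0 < k' → k' ≤ p.length - 1 → (kmpFail p).getD (k' - 1) 0 = bord p k' :=
    fun k' h0 hk' => HF k' h0 (by omega)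
  induction t using List.reverseRecOn with
  | nil => simpa using (ovm_nil p).symm
  | append_singleton t c IH =>
    rw [List.foldl_append, IH]
    simp only [List.foldl_cons, List.foldl_nil]
    set k := ovm p t with hkdef
    have hkm : k ≤ p.length := ovm_le p t
    by_cases hke : k = p.length
    · -- full match: reset to the longest proper border of p
      rw [if_pos hke, HF p.length hp1 le_rfl]
      apply step_ovm p (kmpFail p) c t hp1 HF'
      · exact (take_bord_suffix p p.length).trans
          (by rw [← hke, hkdef]; simpa [← hke] using take_ovm_suffix p t)
      · have := bord_le p p.length
        omega
      · intro b hb hbt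
        apply le_bord p p.length b (by omega)
        have hpt : p.take p.length <:+ t := by
          rw [← hke, hkdef]
          simpa [← hke] using take_ovm_suffix p t
        exact suffix_of_suffix_le hbt hpt (by simp [List.length_take])
    · rw [if_neg hke]
      apply step_ovm p (kmpFail p) c t hp1 HF'
      · exact take_ovm_suffix p t
      · omega
      · intro b hb hbt
        exact le_ovm p t b (by omega) hbt

-- truncating findGreatest's search bound below indices where the predicate fails
theorem fg_cap (P : Nat → Prop) [DecidablePred P] (b c : Nat) (hcb : c ≤ b)
    (h : ∀ j, c < j → j ≤ b → ¬ P j) : Nat.findGreatest P b = Nat.findGreatest P c := by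
  induction b with
  | zero =>
    have : c = 0 := by omega
    simp [this]
  | succ b ih =>
    rcases Nat.eq_or_lt_of_le hcb with he | hlt
    · rw [he]
    · rw [Nat.findGreatest_of_not (h (b + 1) (by omega) le_rfl)]
      exact ih (by omega) (fun j h1 h2 => h j h1 (by omega))

-- A's slice comparison at candidate length i says exactly 'p.take i is a suffix of e'
theorem condA_iff (existing_text new_text : String) (i : Nat) (h0 : 0 < i)
    (_hin : i ≤ existing_text.toList.length) (him : i ≤ new_text.toList.length) :
    (PySem.Str.slice existing_text (some (-(i : Int))) none =
        PySem.Str.slice new_text none (some (i : Int)))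
      ↔ new_text.toList.take i <:+ existing_text.toList := by
  rw [← String.toList_inj]
  simp only [PySem.Str.toList_slice, PySem.Chars.slice_eq_listSlice]
  rw [PySem.List.slice_from_neg_natCast _ _ h0, PySem.List.slice_to_natCast]
  rw [suffix_iff_eq_drop']
  have hl : (new_text.toList.take i).length = i := by
    rw [List.length_take]
    omega
  rw [hl]

-- A's descending loop returns the drop at the greatest matching length (or new_text)
theorem aLoop_spec (existing_text new_text : String) (M : Nat)
    (hM1 : M ≤ existing_text.toList.length) (hM2 : M ≤ new_text.toList.length) :
    removeOverlapLoopA existing_text new_text (PySem.List.pyRange (M : Int) 0 (-1)) =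
      (if Nat.findGreatest (fun j => new_text.toList.take j <:+ existing_text.toList) M = 0
       then new_text
       else PySem.Str.slice new_text
        (some ((Nat.findGreatest (fun j => new_text.toList.take j <:+ existing_text.toList) M : Nat) : Int)) none) := by
  induction M with
  | zero =>
    rw [PySem.List.pyRange_neg_one_eq_nil (by norm_num)]
    simp [removeOverlapLoopA]
  | succ M ih =>
    have h1 : ((M + 1 : Nat) : Int) - 1 = (M : Int) := by push_cast; ring
    rw [PySem.List.pyRange_neg_one_cons (by exact_mod_cast Nat.succ_pos M), h1]
    show (if PySem.Str.slice existing_text (some (-((M + 1 : Nat) : Int))) none =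
        PySem.Str.slice new_text none (some ((M + 1 : Nat) : Int)) then
        PySem.Str.slice new_text (some ((M + 1 : Nat) : Int)) none
      else removeOverlapLoopA existing_text new_text (PySem.List.pyRange (M : Int) 0 (-1))) = _
    rw [Nat.findGreatest_succ]
    by_cases hP : new_text.toList.take (M + 1) <:+ existing_text.toList
    · rw [if_pos ((condA_iff existing_text new_text (M + 1) (by omega) hM1 hM2).2 hP),
        if_pos hP, if_neg (by omega)]
    · rw [if_neg (fun hcond =>
          hP ((condA_iff existing_text new_text (M + 1) (by omega) hM1 hM2).1 hcond)),
        if_neg hP, ih (by omega) (by omega)]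

-- dropping zero characters is the whole string
theorem slice_from_zero (s : String) : PySem.Str.slice s (some ((0 : Nat) : Int)) none = s := by
  apply String.toList_inj.mp
  simp only [PySem.Str.toList_slice, PySem.Chars.slice_eq_listSlice]
  rw [PySem.List.slice_from_natCast]
  rfl

-- ===== VERDICT (by name: the statement is the Claim_ definition above) =====
theorem remove_overlap_spec : Claim_equal_remove_overlap := by
  unfold Claim_equal_remove_overlap Spec_remove_overlap
  intro existing_text new_text _
  by_cases hemp : existing_text = "" ∨ new_text = ""
  · unfold remove_overlap remove_overlap_alt
    rw [if_pos hemp, if_pos hemp]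
  · unfold remove_overlap remove_overlap_alt
    rw [if_neg hemp, if_neg hemp]
    rw [not_or] at hemp
    have hpe : existing_text.toList ≠ [] := fun h => hemp.1 (String.toList_eq_nil_iff.mp h)
    have hpp : new_text.toList ≠ [] := fun h => hemp.2 (String.toList_eq_nil_iff.mp h)
    have hel : 1 ≤ existing_text.toList.length := List.length_pos_iff.2 hpe
    have hpl : 1 ≤ new_text.toList.length := List.length_pos_iff.2 hpp
    -- the B side computes the overlap ovm
    show _ = PySem.Str.slice new_text
      (some ((existing_text.toList.foldl (fun k c =>
          let k0 := if k = new_text.toList.length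
            then (kmpFail new_text.toList).getD (new_text.toList.length - 1) 0 else k
          kmpStep new_text.toList (kmpFail new_text.toList) c k0) 0 : Nat) : Int)) none
    rw [scan_inv new_text.toList hpp existing_text.toList]
    -- the A side scans lengths min |e| |p| … 1 downward
    have hmin : min (PySem.Str.len existing_text) (PySem.Str.len new_text) =
        ((min existing_text.toList.length new_text.toList.length : Nat) : Int) := by
      rw [PySem.Str.len_eq, PySem.Str.len_eq]
      push_cast
      rfl
    rw [hmin, aLoop_spec existing_text new_text _ (min_le_left _ _) (min_le_right _ _)]
    have hcap : Nat.findGreatest (fun j => new_text.toList.take j <:+ existing_text.toList)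
        (min existing_text.toList.length new_text.toList.length) = ovm new_text.toList existing_text.toList := by
      unfold ovm
      rw [eq_comm]
      apply fg_cap _ _ _ (min_le_right _ _)
      intro j hj1 hj2 hPj
      have hlen : (new_text.toList.take j).length ≤ existing_text.toList.length :=
        hPj.length_le
      rw [List.length_take] at hlen
      omega
    rw [hcap]
    by_cases hz : ovm new_text.toList existing_text.toList = 0
    · rw [if_pos hz, hz, slice_from_zero]
    · rw [if_neg hz]
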